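-- pv_equiv track=rewrite | github.com/maimai3566/TIL | bj.py | d_turn
-- ===== SOURCE A (Python) =====
-- def calk_point(hand):
--     point=0 #初期化
--     #カードを降順にしてからポイント計算（1を最後に計算したい）
--     for card in sorted(hand,reverse=True):
--         ten=card[0]
--         if ten>10:
--             point+=10
--         elif ten>=2 and ten<=10:
--             point+=ten
--         elif ten==1:
--             if point<10:
--                 point+=11
--             else:
--                 point+=1
--     return point
--
-- def d_turn(deck,d_hand):
--     while True:
--         d_point=calk_point(d_hand)
--         if d_point>=17:
--             break
--         elif d_point<17:
--             d_hand.append(deck.pop())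
--     return d_point
-- ===== SOURCE B (Python) =====
-- def calk_point(hand):
--     # closed form: non-ace total n, ace count a; if there is any ace, the
--     # first counts 11 exactly when n < 10 and every other ace counts 1,
--     # so the aces contribute 10 + a when n < 10, else a.
--     n = sum(10 if c[0] > 10 else (c[0] if 2 <= c[0] <= 10 else 0) for c in hand)
--     a = sum(1 for c in hand if c[0] == 1)
--     if a == 0:
--         return n
--     return n + (10 + a if n < 10 else a)
--
-- def d_turn(deck, d_hand):
--     p = calk_point(d_hand)
--     while p < 17:
--         d_hand.append(deck.pop())
--         p = calk_point(d_hand)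
--     return p
-- ===== Notes on version B (the rewrite author's own statement) =====
-- stated objective: simpler
-- what changed: calk_point is replaced by a closed form: sum the non-ace contributions, count the aces, and add 10+a (if the non-ace total is below 10) or a for the aces, instead of sorting the hand descending and folding the sequential ace rule; the drawing loop recomputes the point after each draw instead of at the top of the loop.
import Mathlib
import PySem

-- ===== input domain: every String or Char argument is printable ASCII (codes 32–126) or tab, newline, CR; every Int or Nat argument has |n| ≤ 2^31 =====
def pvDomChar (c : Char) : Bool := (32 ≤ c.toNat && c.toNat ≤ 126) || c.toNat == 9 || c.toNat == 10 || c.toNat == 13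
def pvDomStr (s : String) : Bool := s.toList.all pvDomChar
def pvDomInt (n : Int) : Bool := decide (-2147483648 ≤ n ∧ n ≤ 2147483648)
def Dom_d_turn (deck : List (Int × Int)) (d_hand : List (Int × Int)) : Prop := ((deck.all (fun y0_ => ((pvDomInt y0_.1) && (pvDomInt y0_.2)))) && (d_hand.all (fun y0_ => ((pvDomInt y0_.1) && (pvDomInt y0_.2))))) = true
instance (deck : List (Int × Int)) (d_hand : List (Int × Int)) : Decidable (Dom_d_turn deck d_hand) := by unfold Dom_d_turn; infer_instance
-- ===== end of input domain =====

-- B replaces calk_point's sort-and-fold by a closed form (non-ace sum plus an ace formula);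
-- equivalence is about the return value — both programs append the same popped cards to
-- d_hand and pop them from deck in the same way.

-- ===== PORT A =====
-- one iteration of calk_point's for-loop over the descending-sorted hand
def calkStep (point : Int) (card : Int × Int) : Int :=
  let ten := card.1
  if ten > 10 then point + 10
  else if ten ≥ 2 ∧ ten ≤ 10 then point + ten
  else if ten = 1 then (if point < 10 then point + 11 else point + 1)
  else point

def calk_point (hand : List (Int × Int)) : Int :=
  (PySem.List.sorted2 hand (fun c => c.1) (fun c => c.2) true).foldl calkStep 0

-- the while-loop of A's d_turn; when the deck is empty Python raises IndexError (outside Pre_),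
-- the port then returns the current point
def d_turnAux (deck : List (Int × Int)) (d_hand : List (Int × Int)) : Int :=
  let p := calk_point d_hand
  if p ≥ 17 then p
  else
    match h : PySem.List.pop? deck with
    | none => p
    | some (c, rest) => d_turnAux rest (d_hand ++ [c])
termination_by deck.length
decreasing_by
  have := PySem.List.length_of_pop?_eq_some deck h
  simp at this; omega

def d_turn (deck : List (Int × Int)) (d_hand : List (Int × Int)) : Int :=
  d_turnAux deck d_hand

-- ===== PORT B =====
-- closed-form score: non-ace total n, ace count a, aces add 10+a (n<10) or a
def calk_point_alt (hand : List (Int × Int)) : Int :=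
  let n := (hand.map (fun c =>
      if c.1 > 10 then (10 : Int) else if 2 ≤ c.1 ∧ c.1 ≤ 10 then c.1 else 0)).sum
  let a : Int := (hand.countP (fun c => decide (c.1 = 1)) : Int)
  if a = 0 then n else n + (if n < 10 then 10 + a else a)

-- B's while-loop threads the current point; the point is recomputed after each draw.
-- On the empty deck Python raises IndexError (outside Pre_); the port returns the point.
def d_turnAltGo (deck : List (Int × Int)) (d_hand : List (Int × Int)) (p : Int) : Int :=
  if p < 17 then
    match h : PySem.List.pop? deck with
    | none => p
    | some (c, rest) => d_turnAltGo rest (d_hand ++ [c]) (calk_point_alt (d_hand ++ [c]))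
  else p
termination_by deck.length
decreasing_by
  have := PySem.List.length_of_pop?_eq_some deck h
  simp at this; omega

def d_turn_alt (deck : List (Int × Int)) (d_hand : List (Int × Int)) : Int :=
  d_turnAltGo deck d_hand (calk_point_alt d_hand)

-- ===== PRECONDITION & SPEC =====
-- closed-form blackjack score of a hand (used only to state Pre_)
def pvContrib (c : Int × Int) : Int :=
  if c.1 > 10 then 10 else if 2 ≤ c.1 ∧ c.1 ≤ 10 then c.1 else 0

def pvScore (hand : List (Int × Int)) : Int :=
  let n := (hand.map pvContrib).sum
  let a : Int := hand.countP (fun c => c.1 = 1)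
  n + (if a = 0 then 0 else if n < 10 then 10 + a else a)

-- Pre_ excludes exactly the inputs on which A raises IndexError: the dealer empties the deck
-- before the hand's score ever reaches 17 (deck.pop() on the empty deck).
def Pre_d_turn (deck : List (Int × Int)) (d_hand : List (Int × Int)) : Prop :=
  ∃ k : Nat, k ≤ deck.length ∧ 17 ≤ pvScore (d_hand ++ (deck.drop (deck.length - k)).reverse)
instance (deck : List (Int × Int)) (d_hand : List (Int × Int)) : Decidable (Pre_d_turn deck d_hand) := by
  unfold Pre_d_turn; infer_instance

def pvWitness_d_turn : (List (Int × Int)) × (List (Int × Int)) := ([(5, 0)], [(10, 1), (3, 2)])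

def Spec_d_turn (deck : List (Int × Int)) (d_hand : List (Int × Int)) (out : Int) : Prop := out = d_turn_alt deck d_hand
instance (deck : List (Int × Int)) (d_hand : List (Int × Int)) (out : Int) : Decidable (Spec_d_turn deck d_hand out) := by unfold Spec_d_turn; infer_instance

-- ===== CLAIM (what is proved, stated in full; the proofs are below) =====
def Claim_equal_d_turn : Prop := ∀ (deck : List (Int × Int)) (d_hand : List (Int × Int)), Dom_d_turn deck d_hand → Pre_d_turn deck d_hand → Spec_d_turn deck d_hand (d_turn deck d_hand)

-- ===== LEMMAS AND PROOFS =====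

-- the sequential ace rule applied a times
def aceFold (p : Int) : Nat → Int
  | 0 => p
  | a + 1 => aceFold (if p < 10 then p + 11 else p + 1) a

-- descending on first components
def FstDesc (a b : Int × Int) : Prop := b.1 ≤ a.1

theorem fstDesc_trans : Transitive FstDesc := by
  intro a b c hab hbc; exact le_trans hbc hab

-- inserting into an R-pairwise list keeps it R-pairwise, when `before` decides R totally
theorem insertBy_pairwise_of {α : Type} {R : α → α → Prop} (before : α → α → Bool)
    (hT : Transitive R)
    (htot : ∀ a b, (before a b = true → R a b) ∧ (before a b = false → R b a))
    (x : α) (ys : List α) (h : ys.Pairwise R) :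
    (PySem.List.insertBy before x ys).Pairwise R := by
  induction ys with
  | nil => simp [PySem.List.insertBy]
  | cons y ys ih =>
    rw [List.pairwise_cons] at h
    obtain ⟨hy, hys⟩ := h
    rw [PySem.List.insertBy]
    by_cases hb : before x y = true
    · simp only [hb, if_pos]
      refine List.Pairwise.cons ?_ (List.Pairwise.cons hy hys)
      intro z hz
      rcases List.mem_cons.mp hz with rfl | hz
      · exact (htot x z).1 hb
      · exact hT ((htot x y).1 hb) (hy z hz)
    · simp only [hb, if_neg, Bool.false_eq_true, not_false_iff]
      refine List.Pairwise.cons ?_ (ih hys)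
      intro z hz
      rcases (PySem.List.mem_insertBy before x z ys).mp hz with hzx | hz
      · rw [hzx]; exact (htot x y).2 (by simpa using hb)
      · exact hy z hz

theorem foldl_insertBy_pairwise {α : Type} {R : α → α → Prop} (before : α → α → Bool)
    (hT : Transitive R)
    (htot : ∀ a b, (before a b = true → R a b) ∧ (before a b = false → R b a))
    (xs acc : List α) (hacc : acc.Pairwise R) :
    (xs.foldl (fun acc x => PySem.List.insertBy before x acc) acc).Pairwise R := by
  induction xs generalizing acc with
  | nil => simpa using hacc
  | cons x xs ih =>
    simp only [List.foldl_cons]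
    exact ih _ (insertBy_pairwise_of before hT htot x acc hacc)

theorem sorted2_rev_fst_pairwise (hand : List (Int × Int)) :
    (PySem.List.sorted2 hand (fun c => c.1) (fun c => c.2) true).Pairwise FstDesc := by
  unfold PySem.List.sorted2
  apply foldl_insertBy_pairwise _ fstDesc_trans _ _ _ List.Pairwise.nil
  intro a b
  simp only [if_pos rfl]
  constructor
  · intro h
    unfold FstDesc
    by_cases hlt : b.1 < a.1
    · exact le_of_lt hlt
    · simp [hlt] at h
      exact h.1
  · intro h
    unfold FstDesc
    by_cases hlt : b.1 < a.1
    · simp [hlt] at h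
    · omega

-- A's fold over any fst-descending list equals: add the non-ace contributions, then the ace rule
theorem foldl_calkStep_eq (l : List (Int × Int)) (p : Int) (h : l.Pairwise FstDesc) :
    l.foldl calkStep p = aceFold (p + (l.map pvContrib).sum) (l.countP (fun c => c.1 = 1)) := by
  induction l generalizing p with
  | nil => simp [aceFold]
  | cons c t ih =>
    rw [List.pairwise_cons] at h
    obtain ⟨hc, ht⟩ := h
    simp only [List.foldl_cons, List.map_cons, List.sum_cons, List.countP_cons]
    by_cases h2 : 2 ≤ c.1
    · have hstep : calkStep p c = p + pvContrib c := by
        unfold calkStep pvContrib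
        split_ifs <;> simp_all <;> omega
      have hcount : (decide (c.1 = 1)) = false := by simp; omega
      rw [hstep, ih _ ht, hcount]
      simp [add_assoc]
    · have hall0 : ∀ x ∈ t, pvContrib x = 0 := by
        intro x hx
        have : x.1 ≤ c.1 := hc x hx
        unfold pvContrib; split_ifs <;> omega
      have hsum0 : (t.map pvContrib).sum = 0 := by
        apply List.sum_eq_zero
        intro x hx
        obtain ⟨y, hy, rfl⟩ := List.mem_map.mp hx
        exact hall0 y hy
      have hc0 : pvContrib c = 0 := by unfold pvContrib; split_ifs <;> omega
      by_cases h1 : c.1 = 1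
      · have hstep : calkStep p c = (if p < 10 then p + 11 else p + 1) := by
          unfold calkStep; rw [h1]; norm_num
        rw [hstep, ih _ ht, hsum0, hc0]
        simp only [h1, decide_true, if_pos]
        simp [aceFold]
      · have hstep : calkStep p c = p := by
          unfold calkStep; split_ifs <;> simp_all <;> omega
        rw [hstep, ih _ ht, hsum0, hc0]
        simp [h1]

-- the sequential ace rule in closed form, for a nonneg starting point and ≥ 1 aces
theorem aceFold_closed (a : Nat) (p : Int) (hp : 0 ≤ p) (ha : 1 ≤ a) :
    aceFold p a = p + (if p < 10 then 10 + (a : Int) else (a : Int)) := by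
  induction a generalizing p with
  | zero => omega
  | succ a ih =>
    cases a with
    | zero => simp [aceFold]; split_ifs <;> omega
    | succ b =>
      rw [aceFold]
      by_cases h10 : p < 10
      · rw [if_pos h10, ih (p + 11) (by omega) (by omega), if_neg (by omega)]
        rw [if_pos h10]; push_cast; ring
      · rw [if_neg h10, ih (p + 1) (by omega) (by omega), if_neg (by omega)]
        rw [if_neg h10]; push_cast; ring

theorem pvContrib_nonneg (c : Int × Int) : 0 ≤ pvContrib c := by
  unfold pvContrib; split_ifs <;> omega

theorem contribSum_nonneg (l : List (Int × Int)) : 0 ≤ (l.map pvContrib).sum := by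
  induction l with
  | nil => simp
  | cons c t ih =>
    simp only [List.map_cons, List.sum_cons]
    have := pvContrib_nonneg c
    omega

theorem calk_point_eq (hand : List (Int × Int)) : calk_point hand = calk_point_alt hand := by
  unfold calk_point calk_point_alt
  have hperm := PySem.List.sorted2_perm hand (fun c => c.1) (fun c => c.2) true
  rw [foldl_calkStep_eq _ 0 (sorted2_rev_fst_pairwise hand)]
  rw [hperm.countP_eq, (hperm.map pvContrib).sum_eq]
  have hmap : (hand.map (fun c =>
      if c.1 > 10 then (10 : Int) else if 2 ≤ c.1 ∧ c.1 ≤ 10 then c.1 else 0)) = hand.map pvContrib := rfl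
  show aceFold (0 + (hand.map pvContrib).sum) (hand.countP (fun c => decide (c.1 = 1))) = _
  simp only [hmap, zero_add]
  cases ha : hand.countP (fun c => decide (c.1 = 1)) with
  | zero => simp [aceFold]
  | succ b =>
    rw [aceFold_closed _ _ (contribSum_nonneg hand) (by omega)]
    push_cast
    split_ifs <;> omega

theorem aux_eq_n : ∀ (n : Nat) (deck d_hand : List (Int × Int)), deck.length ≤ n →
    d_turnAux deck d_hand = d_turnAltGo deck d_hand (calk_point_alt d_hand) := by
  intro n
  induction n with
  | zero =>
    intro deck d_hand h
    rw [d_turnAux, d_turnAltGo, calk_point_eq]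
    by_cases hp : calk_point_alt d_hand ≥ 17
    · rw [if_pos hp, if_neg (by omega)]
    · rw [if_neg hp, if_pos (by omega)]
      cases hpo : PySem.List.pop? deck with
      | none => rfl
      | some r =>
        have hlen : r.2.length + 1 = deck.length := PySem.List.length_of_pop?_eq_some deck hpo
        exfalso; omega
  | succ n ih =>
    intro deck d_hand h
    rw [d_turnAux, d_turnAltGo, calk_point_eq]
    by_cases hp : calk_point_alt d_hand ≥ 17
    · rw [if_pos hp, if_neg (by omega)]
    · rw [if_neg hp, if_pos (by omega)]
      cases hpo : PySem.List.pop? deck with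
      | none => rfl
      | some r =>
        obtain ⟨c, rest⟩ := r
        have hlen : rest.length + 1 = deck.length := PySem.List.length_of_pop?_eq_some deck hpo
        exact ih rest (d_hand ++ [c]) (by omega)

-- ===== VERDICT (by name: the statement is the Claim_ definition above) =====
theorem d_turn_spec : Claim_equal_d_turn := by
  intro deck d_hand _ _
  unfold Spec_d_turn d_turn d_turn_alt
  exact aux_eq_n deck.length deck d_hand le_rfl
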